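-- pv_equiv track=rewrite | github.com/Meng-Gen/rosalind | BioinformaticsStronghold/LONG/long.py | get_assembly_chain
-- ===== SOURCE A (Python) =====
-- def get_assembly_chain(adjacent_matrix):
--     num_vertex = len(adjacent_matrix)
--     reversed_chain = [get_final_vertex(adjacent_matrix)]
--     while len(reversed_chain) != num_vertex:
--         last_vertex = reversed_chain[-1]
--         for i in range(num_vertex):
--             if adjacent_matrix[i][last_vertex] is True and i != last_vertex:
--                 reversed_chain.append(i)
--                 break
--     return reversed_chain[::-1]
--
-- def get_final_vertex(adjacent_matrix):
--     num_vertex = len(adjacent_matrix)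
--     final_vertex_list = [i for i in range(num_vertex)
--         if adjacent_matrix[i].count(False) == num_vertex - 1]
--     assert(len(final_vertex_list) == 1)
--     return final_vertex_list[0]
-- ===== SOURCE B (Python) =====
-- def get_assembly_chain(adjacent_matrix):
--     n = len(adjacent_matrix)
--     finals = [i for i, row in enumerate(adjacent_matrix) if row.count(False) == n - 1]
--     assert len(finals) == 1
--     # one pass over the matrix builds the predecessor map (first i wins, matching
--     # the ascending break-on-first scan); then walk it back from the final vertex
--     pred = {}
--     for i, row in enumerate(adjacent_matrix):
--         for j, v in enumerate(row):
--             if v is True and i != j: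
--                 pred.setdefault(j, i)
--     chain = [finals[0]]
--     for _ in range(n - 1):
--         chain.insert(0, pred[chain[0]])
--     return chain
-- ===== Notes on version B (the rewrite author's own statement) =====
-- stated objective: alternative
-- what changed: Instead of rescanning all rows of the matrix at every step of the while loop, B builds a predecessor map in one pass over the matrix (setdefault keeps the smallest row index, matching A's break-on-first scan) and then walks it back from the final vertex, prepending each predecessor.
import Mathlib
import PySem

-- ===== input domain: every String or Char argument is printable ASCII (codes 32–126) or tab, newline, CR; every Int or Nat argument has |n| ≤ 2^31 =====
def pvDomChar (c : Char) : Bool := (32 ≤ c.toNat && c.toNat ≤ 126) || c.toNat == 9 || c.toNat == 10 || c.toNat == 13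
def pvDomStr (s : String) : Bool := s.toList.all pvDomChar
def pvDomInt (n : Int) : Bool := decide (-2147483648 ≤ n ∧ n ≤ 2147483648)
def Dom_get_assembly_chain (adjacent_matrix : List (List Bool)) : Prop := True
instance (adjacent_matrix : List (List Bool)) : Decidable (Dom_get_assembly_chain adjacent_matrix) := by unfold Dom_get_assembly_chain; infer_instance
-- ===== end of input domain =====

-- B replaces A's per-step rescanning of the matrix with a predecessor map built in one
-- pass over the matrix, then a direct walk back from the final vertex (alternative algorithm).


-- ===== PORT A =====
-- helper get_final_vertex; the 'assert len(...) == 1' raises outside Pre_, where the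
-- .getD defaults are never reached
def get_final_vertex_port (m : List (List Bool)) : Int :=
  let n : Int := PySem.List.len m
  let fl := (PySem.List.pyRange 0 n 1).filter
      (fun i => decide (((PySem.List.count ((PySem.List.pyGet? m i).getD []) false : Int)) = n - 1))
  (PySem.List.pyGet? fl 0).getD 0

-- the inner 'for i in range(num_vertex): … break' = first i satisfying the test
-- (the evaluation of adjacent_matrix[i][last_vertex] can IndexError in Python; the
-- getD false default is reached only outside Pre_)
def chainStep (m : List (List Bool)) (n last : Int) : Option Int :=
  (PySem.List.pyRange 0 n 1).find? (fun i =>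
    ((PySem.List.pyGet? ((PySem.List.pyGet? m i).getD []) last).getD false) && !(i == last))

-- the while loop: each pass appends the found vertex; when none is found Python loops
-- forever (outside Pre_), so the fuel m.length - 1 (= the number of appends Python
-- performs when it returns) makes this a faithful total port
def chainLoop (m : List (List Bool)) (n : Int) : Nat → List Int → List Int
  | 0, ch => ch
  | k + 1, ch =>
    match chainStep m n (PySem.List.pyGetD ch (-1) 0) with
    | some i => chainLoop m n k (ch ++ [i])
    | none => ch

def get_assembly_chain (adjacent_matrix : List (List Bool)) : List Int :=
  let n : Int := PySem.List.len adjacent_matrix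
  let reversed_chain := chainLoop adjacent_matrix n (adjacent_matrix.length - 1) [get_final_vertex_port adjacent_matrix]
  (PySem.List.slice? reversed_chain none none (-1)).getD []

-- ===== PORT B =====
-- finals list comprehension over enumerate(adjacent_matrix)
def finalsB (m : List (List Bool)) : List Int :=
  ((PySem.List.enumerate m).filter
      (fun p => decide (((PySem.List.count p.2 false : Int)) = PySem.List.len m - 1))).map (·.1)

-- one pass over the matrix: pred.setdefault(j, i) keeps the first (smallest) i
def buildPred (m : List (List Bool)) : PySem.Dict Int Int :=
  (PySem.List.enumerate m).foldl (fun d p =>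
    (PySem.List.enumerate p.2).foldl (fun d q =>
      if q.2 && !(p.1 == q.1) then PySem.Dict.setdefault d q.1 p.1 else d) d)
    PySem.Dict.empty

-- 'for _ in range(n-1): chain.insert(0, pred[chain[0]])'; pred[…] raises KeyError only
-- outside Pre_, where the .getD default is never reached
def walkB (pred : PySem.Dict Int Int) : Nat → List Int → List Int
  | 0, ch => ch
  | k + 1, ch => walkB pred k (PySem.Dict.getD pred (ch.headD 0) 0 :: ch)

def get_assembly_chain_alt (adjacent_matrix : List (List Bool)) : List Int :=
  walkB (buildPred adjacent_matrix) (adjacent_matrix.length - 1)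
    [(finalsB adjacent_matrix).headD 0]

-- ===== PRECONDITION & SPEC =====
-- Pure helpers for Pre_ (independent of either port): the rows whose False-count is
-- n-1, and the deterministic predecessor walk of the input's adjacency relation.
def pvFinals (m : List (List Bool)) : List Nat :=
  (List.range m.length).filter
    (fun i => decide (((m.getD i []).count false : Int) = (m.length : Int) - 1))

-- first clean predecessor of column v among the row indices 'is': 'none' when some row
-- scanned before a hit is too short for column v (Python: IndexError) or no row hits
def pvScan (m : List (List Bool)) (v : Nat) : List Nat → Option Nat
  | [] => none
  | i :: rest =>
    match (m.getD i [])[v]? with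
    | none => none
    | some b => if b && !(i == v) then some i else pvScan m v rest

def pvWalkOK (m : List (List Bool)) : Nat → Nat → Bool
  | 0, _ => true
  | k + 1, v =>
    match pvScan m v (List.range m.length) with
    | some i => pvWalkOK m k i
    | none => false

-- Pre_ holds exactly on the inputs where the Python A RETURNS: the assert passes
-- (unique final vertex) and the n-1 steps of the predecessor walk from it each find a
-- predecessor without reading past the end of a row — otherwise A raises
-- AssertionError/IndexError or loops forever, and nothing is claimed there.
def Pre_get_assembly_chain (adjacent_matrix : List (List Bool)) : Prop :=
  (pvFinals adjacent_matrix).length = 1 ∧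
  pvWalkOK adjacent_matrix (adjacent_matrix.length - 1) ((pvFinals adjacent_matrix).headD 0) = true
instance (adjacent_matrix : List (List Bool)) : Decidable (Pre_get_assembly_chain adjacent_matrix) := by
  unfold Pre_get_assembly_chain; infer_instance

def pvWitness_get_assembly_chain : List (List Bool) := [[false, true], [true, true]]

def Spec_get_assembly_chain (adjacent_matrix : List (List Bool)) (out : List Int) : Prop := out = get_assembly_chain_alt adjacent_matrix
instance (adjacent_matrix : List (List Bool)) (out : List Int) : Decidable (Spec_get_assembly_chain adjacent_matrix out) := by unfold Spec_get_assembly_chain; infer_instance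

-- ===== CLAIM (what is proved, stated in full; the proofs are below) =====
def Claim_equal_get_assembly_chain : Prop := ∀ (adjacent_matrix : List (List Bool)), Dom_get_assembly_chain adjacent_matrix → Pre_get_assembly_chain adjacent_matrix → Spec_get_assembly_chain adjacent_matrix (get_assembly_chain adjacent_matrix)

-- ===== LEMMAS AND PROOFS =====

-- enumerate as a map over range (any default, read only in range)
theorem pv_enum_eq {α : Type} (d : α) : ∀ (xs : List α) (s : Int),
    PySem.List.enumerate xs s = (List.range xs.length).map (fun (k : Nat) => ((s + (k : Int) : Int), xs.getD k d)) := by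
  intro xs
  induction xs with
  | nil => intro s; simp [PySem.List.enumerate]
  | cons x t ih =>
    intro s
    simp [PySem.List.enumerate, List.range_succ_eq_map, ih (s+1), List.map_map, Function.comp]
    intro a _; ring

theorem pv_find?_congr {α : Type} (l : List α) (p q : α → Bool) (h : ∀ a ∈ l, p a = q a) :
    l.find? p = l.find? q := by
  induction l with
  | nil => rfl
  | cons x t ih =>
    rw [List.find?_cons, List.find?_cons, h x (by simp)]
    cases q x
    · exact ih (fun a ha => h a (by simp [ha]))
    · rfl

theorem pv_cond_shift (t : List Bool) (b : Bool) (i s j : Int) (hne : j ≠ s) :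
    (decide (s ≤ j) && decide (j < s + (((b :: t).length : Nat) : Int)) && (b :: t).getD (j - s).toNat false && !(i == j))
      = (decide (s + 1 ≤ j) && decide (j < s + 1 + ((t.length : Nat) : Int)) && t.getD (j - (s + 1)).toNat false && !(i == j)) := by
  by_cases h : s + 1 ≤ j
  · have h1 : s ≤ j := by omega
    have h2 : (j - s).toNat = (j - (s + 1)).toNat + 1 := by omega
    simp [h1, h, h2]
    have h4 : s + ((t.length : Int) + 1) = s + 1 + (t.length : Int) := by ring
    rw [h4]
  · have h1 : ¬ (s ≤ j) := by omega
    simp [h1, h]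

theorem pv_setdefault_eq {κ ν : Type} [BEq κ] (d : PySem.Dict κ ν) (k : κ) (v : ν) :
    PySem.Dict.setdefault d k v = if d.contains k then d else d.insert k v := by
  by_cases h : d.contains k <;> simp [PySem.Dict.setdefault, PySem.Dict.insert, h]

-- hit row i j : row i of the matrix points at column j (the one-pass build's test)
def rowHit (row : List Bool) (i j : Int) : Bool :=
  decide ((0:Int) ≤ j) && decide (j < 0 + (row.length : Int)) && row.getD (j - 0).toNat false && !(i == j)

theorem pv_inner_get? (row : List Bool) (i : Int) :
    ∀ (s : Int) (d : PySem.Dict Int Int) (j : Int),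
    ((PySem.List.enumerate row s).foldl (fun d q =>
        if q.2 && !(i == q.1) then PySem.Dict.setdefault d q.1 i else d) d).get? j
      = ((d.get? j).orElse (fun _ =>
          if decide (s ≤ j) && decide (j < s + (row.length : Int)) && row.getD (j - s).toNat false && !(i == j)
          then some i else none)) := by
  induction row with
  | nil =>
    intro s d j
    simp [PySem.List.enumerate]
  | cons b t ih =>
    intro s d j
    simp only [PySem.List.enumerate, List.foldl_cons]
    rw [ih (s + 1)]
    by_cases hj : j = s
    · subst hj
      by_cases hb : (b && !(i == j)) = true
      · simp only [hb, if_true]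
        rw [pv_setdefault_eq]
        by_cases hc : d.contains j
        · have hs : (d.get? j).isSome := by
            rw [PySem.Dict.contains_eq_isSome_get?] at hc; exact hc
          obtain ⟨v, hv⟩ := Option.isSome_iff_exists.mp hs
          have hsh : ¬ (j + 1 ≤ j) := by omega
          simp [hc, hv, Option.orElse]
        · have hd : d.get? j = none := by
            rw [← Option.not_isSome_iff_eq_none]
            rw [PySem.Dict.contains_eq_isSome_get?] at hc; simpa using hc
          have hsh : ¬ (j + 1 ≤ j) := by omega
          obtain ⟨hb1, hb2⟩ := Bool.and_eq_true_iff.mp hb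
          simp [if_neg hc, hd, Option.orElse, hsh, hb1, hb2]
      · simp only [hb]
        have hsh : ¬ (j + 1 ≤ j) := by omega
        have hz : (j - j).toNat = 0 := by omega
        have hcf : (decide (j ≤ j) && decide (j < j + (((b :: t).length : Nat) : Int)) && (b :: t).getD (j - j).toNat false && !(i == j)) = false := by
          rw [hz]
          cases b <;> simp_all
        rw [hcf]
        have hct : (decide (j + 1 ≤ j) && decide (j < j + 1 + ((t.length : Nat) : Int)) && t.getD (j - (j + 1)).toNat false && !(i == j)) = false := by
          simp [hsh]
        rw [hct]
        simp
    · rw [pv_cond_shift t b i s j hj]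
      by_cases hb : (b && !(i == s)) = true
      · simp only [hb, if_true]
        rw [pv_setdefault_eq]
        by_cases hc : d.contains s
        · simp [hc]
        · have : (d.insert s i).get? j = d.get? j := by
            rw [PySem.Dict.get?_insert]; simp [hj]
          simp [if_neg hc, this]
      · simp [hb]

theorem pv_outer_get? (mrows : List (List Bool)) :
    ∀ (s : Int) (d : PySem.Dict Int Int) (j : Int),
    ((PySem.List.enumerate mrows s).foldl (fun d p =>
        (PySem.List.enumerate p.2).foldl (fun d q =>
          if q.2 && !(p.1 == q.1) then PySem.Dict.setdefault d q.1 p.1 else d) d) d).get? j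
      = ((d.get? j).orElse (fun _ =>
          ((PySem.List.enumerate mrows s).find? (fun p => rowHit p.2 p.1 j)).map (·.1))) := by
  induction mrows with
  | nil => intro s d j; simp [PySem.List.enumerate]
  | cons row t ih =>
    intro s d j
    simp only [PySem.List.enumerate, List.foldl_cons, List.find?_cons]
    rw [ih (s + 1)]
    rw [pv_inner_get? row s 0 d j]
    have hrh : (decide ((0:Int) ≤ j) && decide (j < 0 + (row.length : Int)) && row.getD (j - 0).toNat false && !(s == j)) = rowHit row s j := rfl
    rw [hrh]
    cases hd : d.get? j <;> cases hr : rowHit row s j <;> simp_all [Option.orElse]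

-- the scan of A's inner for loop (through the getD-false default) and the scan hidden
-- in B's one-pass predecessor build both find exactly pvScan's answer when it is clean
theorem pv_scan_agree (m : List (List Bool)) (v : Nat) :
    ∀ (is : List Nat) (i : Nat), pvScan m v is = some i →
      is.find? (fun k => (m.getD k []).getD v false && !(k == v)) = some i ∧
      is.find? (fun k => rowHit (m.getD k []) (k : Int) (v : Int)) = some i := by
  intro is
  induction is with
  | nil => intro i h; simp [pvScan] at h
  | cons j rest ih =>
    intro i h
    simp only [pvScan] at h
    cases hget : (m.getD j [])[v]? with
    | none => simp only [hget] at h; cases h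
    | some b =>
      simp only [hget] at h
      have hin : v < (m.getD j []).length := by
        by_contra hc
        rw [List.getElem?_eq_none (by omega)] at hget
        simp at hget
      have hgd : (m.getD j []).getD v false = b := by
        rw [List.getD_eq_getElem?_getD, hget]; rfl
      have hrow : rowHit (m.getD j []) (j : Int) (v : Int) = (b && !(j == v)) := by
        unfold rowHit
        have h1 : decide ((0:Int) ≤ (v:Int)) = true := by simp
        have h2 : decide ((v:Int) < 0 + ((m.getD j []).length : Int)) = true := by
          simp only [decide_eq_true_eq]; omega
        have h3 : ((v:Int) - 0).toNat = v := by omega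
        have h4 : (!((j:Int) == (v:Int))) = (!(j == v)) := by simp
        rw [h1, h2, h3, h4, hgd]; simp
      by_cases hb : (b && !(j == v)) = true
      · rw [if_pos hb] at h
        refine ⟨?_, ?_⟩ <;>
          · rw [List.find?_cons]
            simp only [hgd, hrow, hb]
            exact h
      · rw [if_neg hb] at h
        obtain ⟨h1, h2⟩ := ih i h
        refine ⟨?_, ?_⟩ <;>
          · rw [List.find?_cons]
            simp only [hgd, hrow, Bool.not_eq_true] at hb ⊢
            rw [hb]
            assumption

theorem pv_chainStep_eq (m : List (List Bool)) (v i : Nat)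
    (h : pvScan m v (List.range m.length) = some i) :
    chainStep m (m.length : Int) (v : Int) = some (i : Int) := by
  unfold chainStep
  rw [PySem.List.pyRange_zero_nat, List.find?_map]
  have hc : ∀ k ∈ List.range m.length,
      ((fun i => ((PySem.List.pyGet? ((PySem.List.pyGet? m i).getD []) (v : Int)).getD false) && !(i == (v : Int))) ∘ (fun (k : Nat) => (k : Int))) k
        = (fun k => (m.getD k []).getD v false && !(k == v)) k := by
    intro k hk
    have hkn : k < m.length := List.mem_range.mp hk
    have e1 : PySem.List.pyGet? m (k : Int) = some m[k] := by
      rw [PySem.List.pyGet?_natCast]; exact List.getElem?_eq_getElem hkn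
    have e2 : PySem.List.pyGet? m[k] (v : Int) = m[k][v]? := PySem.List.pyGet?_natCast m[k] v
    have e3 : m.getD k [] = m[k] := List.getD_eq_getElem m [] hkn
    simp only [Function.comp, e1, Option.getD_some, e2, e3, List.getD_eq_getElem?_getD]
    simp only [beq_eq_decide]
    simp
  rw [pv_find?_congr _ _ _ hc, (pv_scan_agree m v (List.range m.length) i h).1]
  rfl

theorem pv_buildPred_get? (m : List (List Bool)) (v i : Nat)
    (h : pvScan m v (List.range m.length) = some i) :
    (buildPred m).get? (v : Int) = some (i : Int) := by
  unfold buildPred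
  rw [pv_outer_get? m 0 PySem.Dict.empty (v : Int)]
  rw [PySem.Dict.get?_empty]
  rw [pv_enum_eq ([] : List Bool) m 0]
  rw [List.find?_map]
  have hc : ∀ k ∈ List.range m.length,
      ((fun p => rowHit p.2 p.1 (v : Int)) ∘ (fun (k : Nat) => ((0 + (k : Int) : Int), m.getD k []))) k
        = (fun k => rowHit (m.getD k []) (k : Int) (v : Int)) k := by
    intro k _
    simp [Function.comp]
  rw [pv_find?_congr _ _ _ hc, (pv_scan_agree m v (List.range m.length) i h).2]
  simp [Option.orElse]

-- both walks step through the same vertices: A's rescan step and B's map lookup agree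
-- at every vertex the clean walk visits
theorem pv_walk_eq (m : List (List Bool)) :
    ∀ (k : Nat) (ch : List Nat) (hne : ch ≠ []),
      pvWalkOK m k (ch.getLast hne) = true →
      (chainLoop m (m.length : Int) k (List.map (fun (x : Nat) => (x : Int)) ch)).reverse
        = walkB (buildPred m) k (List.map (fun (x : Nat) => (x : Int)) ch).reverse := by
  intro k
  induction k with
  | zero => intro ch hne _; simp [chainLoop, walkB]
  | succ k ih =>
    intro ch hne hok
    simp only [pvWalkOK] at hok
    cases hscan : pvScan m (ch.getLast hne) (List.range m.length) with
    | none => rw [hscan] at hok; simp at hok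
    | some i =>
      rw [hscan] at hok
      have hmap_ne : List.map (fun (x : Nat) => (x : Int)) ch ≠ [] := by
        simp only [ne_eq, List.map_eq_nil_iff]; exact hne
      have hget : PySem.List.pyGetD (List.map (fun (x : Nat) => (x : Int)) ch) (-1) 0 = ((ch.getLast hne : Nat) : Int) := by
        rw [PySem.List.pyGetD_neg_one _ 0 hmap_ne, List.getLast_map]
      have hhead : (List.map (fun (x : Nat) => (x : Int)) ch).reverse.headD 0 = ((ch.getLast hne : Nat) : Int) := by
        rw [List.headD_eq_head?, List.head?_reverse, List.getLast?_eq_some_getLast hmap_ne, List.getLast_map]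
        rfl
      have hstepEq := pv_chainStep_eq m (ch.getLast hne) i hscan
      have hdict : PySem.Dict.getD (buildPred m) ((ch.getLast hne : Nat) : Int) 0 = (i : Int) := by
        rw [PySem.Dict.getD_eq_get?_getD, pv_buildPred_get? m (ch.getLast hne) i hscan]; rfl
      simp only [chainLoop, walkB, hget, hstepEq, hhead, hdict]
      have hcomm : List.map (fun (x : Nat) => (x : Int)) ch ++ [(i : Int)] = List.map (fun (x : Nat) => (x : Int)) (ch ++ [i]) := by simp
      have hrev : (List.map (fun (x : Nat) => (x : Int)) (ch ++ [i])).reverse = (i : Int) :: (List.map (fun (x : Nat) => (x : Int)) ch).reverse := by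
        simp
      have hlast : (ch ++ [i]).getLast (by simp) = i := by simp
      rw [hcomm, ih (ch ++ [i]) (by simp) (by rw [hlast]; exact hok), hrev]

theorem pv_finals_eq (m : List (List Bool)) :
    finalsB m = (pvFinals m).map (fun (k : Nat) => (k : Int)) := by
  unfold finalsB pvFinals
  rw [pv_enum_eq ([] : List Bool) m 0, List.filter_map, List.map_map]
  have hp : ((fun p : Int × List Bool => decide (((PySem.List.count p.2 false : Int)) = PySem.List.len m - 1)) ∘ (fun (k : Nat) => ((0 + (k : Int) : Int), m.getD k [])))
      = (fun i => decide (((m.getD i []).count false : Int) = (m.length : Int) - 1)) := by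
    funext k
    simp [PySem.List.count, PySem.List.len_eq, List.count]
  rw [hp]
  apply List.map_congr_left
  intro k _
  simp

theorem pv_final_vertex_eq (m : List (List Bool)) :
    get_final_vertex_port m = (finalsB m).headD 0 := by
  simp only [get_final_vertex_port]
  rw [PySem.List.len_eq, pv_finals_eq, PySem.List.pyRange_zero_nat, List.filter_map]
  have hc : ∀ k ∈ List.range m.length,
      ((fun i => decide (((PySem.List.count ((PySem.List.pyGet? m i).getD []) false : Int)) = (m.length : Int) - 1)) ∘ (fun (k : Nat) => (k : Int))) k
        = (fun i => decide (((m.getD i []).count false : Int) = (m.length : Int) - 1)) k := by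
    intro k hk
    have hkn : k < m.length := List.mem_range.mp hk
    have e1 : PySem.List.pyGet? m (k : Int) = some m[k] := by
      rw [PySem.List.pyGet?_natCast]; exact List.getElem?_eq_getElem hkn
    simp [Function.comp, e1, PySem.List.count, List.getElem?_eq_getElem hkn]
  rw [List.filter_congr hc]
  rw [PySem.List.pyGet?_zero]
  unfold pvFinals
  cases (List.range m.length).filter (fun i => decide (((m.getD i []).count false : Int) = (m.length : Int) - 1)) <;>
    simp

-- ===== VERDICT (by name: the statement is the Claim_ definition above) =====
theorem get_assembly_chain_spec : Claim_equal_get_assembly_chain := by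
  intro m _ hpre
  obtain ⟨hone, hwalkok⟩ := hpre
  unfold Spec_get_assembly_chain
  obtain ⟨f, hf⟩ := List.length_eq_one_iff.mp hone
  have hfinB : finalsB m = [(f : Int)] := by rw [pv_finals_eq, hf]; rfl
  have hfinA : get_final_vertex_port m = (f : Int) := by rw [pv_final_vertex_eq, hfinB]; rfl
  have hheadf : (pvFinals m).headD 0 = f := by rw [hf]; rfl
  rw [hheadf] at hwalkok
  have hwalk := pv_walk_eq m (m.length - 1) [f] (by simp) (by simpa using hwalkok)
  simp only [get_assembly_chain, get_assembly_chain_alt]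
  rw [PySem.List.len_eq, hfinA, hfinB, PySem.List.slice?_none_none_neg_one]
  simpa using hwalk
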